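-- pv_equiv track=rewrite | github.com/adrianruiiz/Detecci-nMonedas | identificador_monedas.py | calcular_total_dinero
-- ===== SOURCE A (Python) =====
-- def calcular_total_dinero(conteo_monedas):
--     valores_monedas = {
--         "1 peso": 1,
--         "2 pesos": 2,
--         "5 pesos": 5,
--         "10 pesos": 10
--     }
--
--     total_dinero = 0
--     for tipo, conteo in conteo_monedas.items():
--         if tipo in valores_monedas:
--             total_dinero += conteo * valores_monedas[tipo]
--     return total_dinero
-- ===== SOURCE B (Python) =====
-- def calcular_total_dinero(conteo_monedas):
--     return sum(conteo_monedas.get(tipo, 0) * valor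
--                for tipo, valor in (("1 peso", 1), ("2 pesos", 2),
--                                    ("5 pesos", 5), ("10 pesos", 10)))
-- ===== Notes on version B (the rewrite author's own statement) =====
-- stated objective: simpler
-- what changed: B drives the loop over the fixed four-entry value table and looks each type up in the input dict with get(tipo, 0), instead of iterating over the input dict and testing membership in the value table; the membership branch disappears.
import Mathlib
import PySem

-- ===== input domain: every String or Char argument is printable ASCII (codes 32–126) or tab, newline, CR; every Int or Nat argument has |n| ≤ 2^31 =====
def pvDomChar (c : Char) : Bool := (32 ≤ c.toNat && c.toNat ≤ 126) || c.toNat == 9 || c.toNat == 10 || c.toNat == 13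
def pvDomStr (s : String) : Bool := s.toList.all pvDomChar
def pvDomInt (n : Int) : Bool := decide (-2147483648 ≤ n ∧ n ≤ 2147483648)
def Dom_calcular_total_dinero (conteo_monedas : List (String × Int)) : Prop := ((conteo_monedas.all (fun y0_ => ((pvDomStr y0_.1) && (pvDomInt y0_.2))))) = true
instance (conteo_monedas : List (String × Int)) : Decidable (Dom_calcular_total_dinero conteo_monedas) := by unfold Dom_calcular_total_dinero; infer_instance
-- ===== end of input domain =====

-- B sums get(tipo, 0) * valor over the fixed four-entry value table instead of
-- scanning the input dict with a membership test; same cost, simpler (objective: simpler).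

-- ===== PORT A =====
def pvValores : PySem.Dict String Int :=
  ((((PySem.Dict.empty).insert "1 peso" 1).insert "2 pesos" 2).insert "5 pesos" 5).insert "10 pesos" 10

def calcular_total_dinero (conteo_monedas : List (String × Int)) : Int :=
  conteo_monedas.foldl
    (fun total_dinero p =>
      if pvValores.contains p.1 then total_dinero + p.2 * pvValores.getD p.1 0
      else total_dinero) 0

-- ===== PORT B =====
def calcular_total_dinero_alt (conteo_monedas : List (String × Int)) : Int :=
  ([("1 peso", (1 : Int)), ("2 pesos", 2), ("5 pesos", 5), ("10 pesos", 10)].map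
    (fun p => (PySem.Dict.mk conteo_monedas).getD p.1 0 * p.2)).sum

-- ===== PRECONDITION & SPEC =====
-- Pre_ requires the association list's keys to be distinct: the Python argument is a
-- dict, whose keys are necessarily unique; duplicate-key lists represent no dict.
def Pre_calcular_total_dinero (conteo_monedas : List (String × Int)) : Prop :=
  (conteo_monedas.map Prod.fst).Nodup
instance (conteo_monedas : List (String × Int)) : Decidable (Pre_calcular_total_dinero conteo_monedas) := by unfold Pre_calcular_total_dinero; infer_instance

def pvWitness_calcular_total_dinero : (List (String × Int)) := [("1 peso", 3), ("5 pesos", 2), ("junk", 9)]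

def Spec_calcular_total_dinero (conteo_monedas : List (String × Int)) (out : Int) : Prop := out = calcular_total_dinero_alt conteo_monedas
instance (conteo_monedas : List (String × Int)) (out : Int) : Decidable (Spec_calcular_total_dinero conteo_monedas out) := by unfold Spec_calcular_total_dinero; infer_instance

-- ===== CLAIM (what is proved, stated in full; the proofs are below) =====
def Claim_equal_calcular_total_dinero : Prop := ∀ (conteo_monedas : List (String × Int)), Dom_calcular_total_dinero conteo_monedas → Pre_calcular_total_dinero conteo_monedas → Spec_calcular_total_dinero conteo_monedas (calcular_total_dinero conteo_monedas)

-- ===== LEMMAS AND PROOFS =====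

-- A's fold with an arbitrary starting accumulator.
theorem foldA_acc (l : List (String × Int)) (a : Int) :
    l.foldl (fun total_dinero p =>
      if pvValores.contains p.1 then total_dinero + p.2 * pvValores.getD p.1 0
      else total_dinero) a
    = a + l.foldl (fun total_dinero p =>
      if pvValores.contains p.1 then total_dinero + p.2 * pvValores.getD p.1 0
      else total_dinero) 0 := by
  induction l generalizing a with
  | nil => simp
  | cons hd tl ih =>
    simp only [List.foldl_cons]
    rw [ih, ih (if pvValores.contains hd.1 then 0 + hd.2 * pvValores.getD hd.1 0 else 0)]
    split_ifs <;> ring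

theorem getD_mk_cons (t : String) (c : Int) (rest : List (String × Int)) (k : String) :
    (PySem.Dict.mk ((t, c) :: rest)).getD k 0
      = if t = k then c else (PySem.Dict.mk rest).getD k 0 := by
  rw [PySem.Dict.getD_eq_get?_getD, PySem.Dict.getD_eq_get?_getD, PySem.Dict.get?_mk_cons]
  by_cases h : t = k <;> simp [h]

theorem getD_mk_not_mem (rest : List (String × Int)) (k : String)
    (h : k ∉ rest.map Prod.fst) : (PySem.Dict.mk rest).getD k 0 = 0 := by
  apply PySem.Dict.getD_of_not_contains
  simpa [PySem.Dict.contains_eq_decide_mem_keys, PySem.Dict.keys] using h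

theorem calc_equiv (l : List (String × Int)) (h : (l.map Prod.fst).Nodup) :
    calcular_total_dinero l = calcular_total_dinero_alt l := by
  induction l with
  | nil => decide
  | cons hd tl ih =>
    obtain ⟨t, c⟩ := hd
    simp only [List.map_cons, List.nodup_cons] at h
    obtain ⟨hnm, hnd⟩ := h
    have ihe := ih hnd
    simp only [calcular_total_dinero, List.foldl_cons] at ihe ⊢
    rw [foldA_acc]
    simp only [calcular_total_dinero_alt, List.map_cons, List.map_nil, List.sum_cons,
      List.sum_nil, getD_mk_cons] at ihe ⊢
    rw [ihe]
    by_cases h1 : t = "1 peso"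
    · subst h1
      have hz := getD_mk_not_mem tl "1 peso" hnm
      have c1 : pvValores.contains "1 peso" = true := by decide
      have g1 : pvValores.getD "1 peso" 0 = 1 := by decide
      simp [c1, g1, hz]
    · by_cases h2 : t = "2 pesos"
      · subst h2
        have hz := getD_mk_not_mem tl "2 pesos" hnm
        have c1 : pvValores.contains "2 pesos" = true := by decide
        have g1 : pvValores.getD "2 pesos" 0 = 2 := by decide
        simp [c1, g1, hz]; ring
      · by_cases h5 : t = "5 pesos"
        · subst h5
          have hz := getD_mk_not_mem tl "5 pesos" hnm
          have c1 : pvValores.contains "5 pesos" = true := by decide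
          have g1 : pvValores.getD "5 pesos" 0 = 5 := by decide
          simp [c1, g1, hz]; ring
        · by_cases h10 : t = "10 pesos"
          · subst h10
            have hz := getD_mk_not_mem tl "10 pesos" hnm
            have c1 : pvValores.contains "10 pesos" = true := by decide
            have g1 : pvValores.getD "10 pesos" 0 = 10 := by decide
            simp [c1, g1, hz]; ring
          · have hc : pvValores.contains t = false := by
              simp [pvValores, PySem.Dict.contains_insert, PySem.Dict.contains_empty,
                h1, h2, h5, h10]
            simp [hc, h1, h2, h5, h10]

-- ===== VERDICT (by name: the statement is the Claim_ definition above) =====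
theorem calcular_total_dinero_spec : Claim_equal_calcular_total_dinero := by
  intro l _ hpre
  exact calc_equiv l hpre
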